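-- pv_equiv track=rewrite | github.com/thorwhalen/atonal | atonal/base.py | interval_stack_voicings
-- ===== SOURCE A (Python) =====
-- from typing import (
--     Iterable,
--     Iterator,
--     List,
--     Tuple,
--     Callable,
--     Dict,
--     Any,
--     Sequence,
--     Set,
--     FrozenSet,
--     Optional,
--     Hashable,
-- )
--
-- def interval_stack_voicings(
--     root: int = 0,
--     max_semitones: int = 24,
--     allowed_intervals: Sequence[int] = (1, 2, 3, 4, 5, 7, 8, 9, 12),
--     max_notes: int = 5,
--     min_notes: int = 2,
-- ) -> List[Tuple[int, ...]]:
--     """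
--     Enumerate voicings by *stacking intervals* above a root, staying within
--     `max_semitones`.
--
--     The algorithm:
--         - start with [root]
--         - at each step add one of allowed_intervals to the *last* pitch
--         - stop when adding any allowed interval would go past max_semitones
--         - keep sequences whose length is between min_notes and max_notes
--
--     This is *exactly* the "fixed root, bounded range, interval stacking"
--     approach you described.
--
--     Args:
--         root: base pitch (0 means 'C' abstractly).
--         max_semitones: highest allowed pitch = root + max_semitones.
--         allowed_intervals: intervals (in semitones) you can stack.
--         max_notes: maximum size of the voicing.
--         min_notes: minimum size of the voicing.
--
--     Returns:
--         List of tuples, each a voicing like (0, 4, 7) or (0, 5, 9, 12).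
--
--     >>> v = interval_stack_voicings(
--     ...     root=0,
--     ...     max_semitones=12,
--     ...     allowed_intervals=(3, 4, 5),
--     ...     max_notes=4,
--     ...     min_notes=3,
--     ... )
--     >>> (0, 4, 7) in v or (0, 3, 7) in v
--     True
--     """
--     results: List[Tuple[int, ...]] = []
--
--     def _recur(current: List[int]) -> None:
--         if min_notes <= len(current) <= max_notes:
--             results.append(tuple(current))
--         if len(current) >= max_notes:
--             return
--         last = current[-1]
--         for iv in allowed_intervals:
--             nxt = last + iv
--             if nxt - root > max_semitones:
--                 continue
--             current.append(nxt)
--             _recur(current)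
--             current.pop()
--
--     _recur([root])
--     return results
-- ===== SOURCE B (Python) =====
-- def interval_stack_voicings(
--     root: int = 0,
--     max_semitones: int = 24,
--     allowed_intervals=(1, 2, 3, 4, 5, 7, 8, 9, 12),
--     max_notes: int = 5,
--     min_notes: int = 2,
-- ):
--     """Iterative pre-order DFS with an explicit stack instead of recursion."""
--     results = []
--     stack = [[root]]
--     while stack:
--         path = stack.pop()
--         n = len(path)
--         if min_notes <= n <= max_notes:
--             results.append(tuple(path))
--         if n < max_notes:
--             last = path[-1]
--             # push in reverse interval order so the first interval is popped first
--             for iv in reversed(allowed_intervals):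
--                 nxt = last + iv
--                 if nxt - root <= max_semitones:
--                     stack.append(path + [nxt])
--     return results
-- ===== Notes on version B (the rewrite author's own statement) =====
-- stated objective: alternative
-- what changed: The recursive DFS with a mutated path list and closure-captured results is replaced by an iterative pre-order traversal using an explicit LIFO stack (pushing extensions in reverse interval order to reproduce A's output order); Pre_ excludes inputs whose DFS reaches paths deeper than 9000, on which A blows the recursion limit (RecursionError) instead of returning.
import Mathlib
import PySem

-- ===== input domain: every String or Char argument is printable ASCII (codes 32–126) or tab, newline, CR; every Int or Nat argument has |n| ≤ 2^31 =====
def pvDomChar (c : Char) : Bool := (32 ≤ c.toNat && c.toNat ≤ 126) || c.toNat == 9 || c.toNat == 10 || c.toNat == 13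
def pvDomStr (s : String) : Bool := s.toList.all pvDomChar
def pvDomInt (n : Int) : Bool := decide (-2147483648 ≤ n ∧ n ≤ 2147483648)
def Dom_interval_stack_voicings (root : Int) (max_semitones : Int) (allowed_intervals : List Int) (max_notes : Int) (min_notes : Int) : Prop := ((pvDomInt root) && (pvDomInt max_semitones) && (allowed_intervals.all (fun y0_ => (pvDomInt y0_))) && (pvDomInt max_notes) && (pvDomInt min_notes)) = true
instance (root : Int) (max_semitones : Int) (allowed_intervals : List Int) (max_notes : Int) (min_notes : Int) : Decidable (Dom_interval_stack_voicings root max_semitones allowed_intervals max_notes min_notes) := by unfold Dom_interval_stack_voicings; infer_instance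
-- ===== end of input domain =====

-- B replaces A's recursive DFS by an iterative explicit-stack pre-order traversal (objective: alternative; same output, same cost).

-- ===== PORT A =====
-- current[-1] (path is always nonempty at this use, so the default is never taken)
def pvLastD (l : List Int) : Int := (PySem.List.pyGet? l (-1)).getD 0

mutual
-- _recur(current): append current to results when in range, stop at max_notes, else loop over allowed_intervals
def pvRecurA (root ms : Int) (allowed : List Int) (maxN minN : Int) (current : List Int) (results : List (List Int)) : List (List Int) :=
  let results1 := if minN ≤ (current.length : Int) ∧ (current.length : Int) ≤ maxN then results ++ [current] else results
  if (current.length : Int) ≥ maxN then results1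
  else pvLoopA root ms allowed maxN minN current allowed results1
termination_by ((maxN - (current.length : Int)).toNat, allowed.length + 1)

-- the 'for iv in allowed_intervals' loop of _recur; the inner dite is a totality guard only
-- (every call site has current.length < maxN, so the 'else results' branch is never the value taken on reachable states)
def pvLoopA (root ms : Int) (allowed : List Int) (maxN minN : Int) (current : List Int) (ivs : List Int) (results : List (List Int)) : List (List Int) :=
  match ivs with
  | [] => results
  | iv :: rest =>
    let nxt := pvLastD current + iv
    if nxt - root > ms then pvLoopA root ms allowed maxN minN current rest results
    else if h : (current.length : Int) < maxN then
      pvLoopA root ms allowed maxN minN current rest (pvRecurA root ms allowed maxN minN (current ++ [nxt]) results)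
    else pvLoopA root ms allowed maxN minN current rest results
termination_by ((maxN - (current.length : Int)).toNat, ivs.length)
end

def interval_stack_voicings (root : Int) (max_semitones : Int) (allowed_intervals : List Int) (max_notes : Int) (min_notes : Int) : List (List Int) :=
  pvRecurA root max_semitones allowed_intervals max_notes min_notes [root] []

-- ===== PORT B =====
-- potential of a stack: each pending path can produce at most (|allowed|+1)^(max_notes - len) nodes; used only for termination
def pvPhi (allowed : List Int) (maxN : Int) (stack : List (List Int)) : Nat :=
  (stack.map (fun p => (allowed.length + 1) ^ ((maxN - (p.length : Int)).toNat))).sum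

-- the 'for iv in reversed(allowed_intervals)' push loop of B
def pvPushB (root ms : Int) (allowed : List Int) (path : List Int) (stack : List (List Int)) : List (List Int) :=
  allowed.reverse.foldl
    (fun st iv => if pvLastD path + iv - root ≤ ms then st ++ [path ++ [pvLastD path + iv]] else st) stack

def pvW (allowed : List Int) (maxN : Int) (p : List Int) : Nat :=
  (allowed.length + 1) ^ ((maxN - (p.length : Int)).toNat)

theorem pvPhi_eq_sum (allowed : List Int) (maxN : Int) (stack : List (List Int)) :
    pvPhi allowed maxN stack = (stack.map (pvW allowed maxN)).sum := rfl

theorem pvPhi_append (allowed : List Int) (maxN : Int) (s t : List (List Int)) :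
    pvPhi allowed maxN (s ++ t) = pvPhi allowed maxN s + pvPhi allowed maxN t := by
  simp [pvPhi_eq_sum]

theorem pvPhi_singleton (allowed : List Int) (maxN : Int) (p : List Int) :
    pvPhi allowed maxN [p] = pvW allowed maxN p := by
  simp [pvPhi_eq_sum]

theorem pvW_snoc (allowed : List Int) (maxN : Int) (p : List Int) (x : Int) :
    pvW allowed maxN (p ++ [x]) = (allowed.length + 1) ^ ((maxN - ((p.length : Int) + 1)).toNat) := by
  unfold pvW
  congr 1
  simp

theorem pvPhi_foldl_le (root ms maxN : Int) (allowed : List Int) (path : List Int)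
    (l : List Int) (st : List (List Int)) :
    pvPhi allowed maxN
      (l.foldl (fun st iv => if pvLastD path + iv - root ≤ ms then st ++ [path ++ [pvLastD path + iv]] else st) st)
    ≤ pvPhi allowed maxN st + l.length * (allowed.length + 1) ^ ((maxN - ((path.length : Int) + 1)).toNat) := by
  induction l generalizing st with
  | nil => simp
  | cons iv rest ih =>
    simp only [List.foldl_cons, List.length_cons, Nat.succ_mul]
    split
    · calc _ ≤ pvPhi allowed maxN (st ++ [path ++ [pvLastD path + iv]])
              + rest.length * (allowed.length + 1) ^ ((maxN - ((path.length : Int) + 1)).toNat) := ih _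
        _ ≤ _ := by
            rw [pvPhi_append, pvPhi_singleton, pvW_snoc]
            omega
    · calc _ ≤ pvPhi allowed maxN st
              + rest.length * (allowed.length + 1) ^ ((maxN - ((path.length : Int) + 1)).toNat) := ih _
        _ ≤ _ := by omega

theorem pvPhi_push_lt (root ms maxN : Int) (allowed : List Int) (path : List Int) (st : List (List Int))
    (h : (path.length : Int) < maxN) :
    pvPhi allowed maxN (pvPushB root ms allowed path st) < pvPhi allowed maxN (st ++ [path]) := by
  have e1 : (maxN - (path.length : Int)).toNat = (maxN - ((path.length : Int) + 1)).toNat + 1 := by omega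
  have hle := pvPhi_foldl_le root ms maxN allowed path allowed.reverse st
  have hpow : allowed.length * (allowed.length + 1) ^ ((maxN - ((path.length : Int) + 1)).toNat)
      < pvW allowed maxN path := by
    unfold pvW
    rw [e1, pow_succ]
    have hp : 1 ≤ (allowed.length + 1) ^ ((maxN - ((path.length : Int) + 1)).toNat) :=
      Nat.one_le_pow _ _ (by omega)
    nlinarith
  rw [pvPhi_append, pvPhi_singleton]
  rw [List.length_reverse] at hle
  unfold pvPushB
  omega

theorem pvPhi_dropLast_lt (allowed : List Int) (maxN : Int) (stack : List (List Int))
    (hs : stack ≠ []) :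
    pvPhi allowed maxN stack.dropLast < pvPhi allowed maxN stack := by
  conv_rhs => rw [← List.dropLast_append_getLast hs]
  rw [pvPhi_append, pvPhi_singleton]
  have : 0 < pvW allowed maxN (stack.getLast hs) := Nat.one_le_pow _ _ (by omega)
  omega

-- the 'while stack:' loop of B ('stack.pop()' = last element of the nonempty stack)
def pvLoopB (root ms : Int) (allowed : List Int) (maxN minN : Int) (stack : List (List Int)) (results : List (List Int)) : List (List Int) :=
  if hs : stack = [] then results
  else
    let path := stack.getLast hs
    let stack' := stack.dropLast
    let results1 := if minN ≤ (path.length : Int) ∧ (path.length : Int) ≤ maxN then results ++ [path] else results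
    if hlt : (path.length : Int) < maxN then
      pvLoopB root ms allowed maxN minN (pvPushB root ms allowed path stack') results1
    else
      pvLoopB root ms allowed maxN minN stack' results1
termination_by pvPhi allowed maxN stack
decreasing_by
  · calc pvPhi allowed maxN (pvPushB root ms allowed (stack.getLast hs) stack.dropLast)
        < pvPhi allowed maxN (stack.dropLast ++ [stack.getLast hs]) :=
          pvPhi_push_lt root ms maxN allowed _ _ hlt
      _ ≤ pvPhi allowed maxN stack := by rw [List.dropLast_append_getLast hs]
  · exact pvPhi_dropLast_lt allowed maxN stack hs

def interval_stack_voicings_alt (root : Int) (max_semitones : Int) (allowed_intervals : List Int) (max_notes : Int) (min_notes : Int) : List (List Int) :=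
  pvLoopB root max_semitones allowed_intervals max_notes min_notes [[root]] []

-- ===== PRECONDITION & SPEC =====
-- Pre_ excludes inputs on which the DFS reaches paths longer than 9000: there A's recursion blows
-- the interpreter's recursion limit (RecursionError) instead of returning, while iterative B returns.
def Pre_interval_stack_voicings (root : Int) (max_semitones : Int) (allowed_intervals : List Int) (max_notes : Int) (min_notes : Int) : Prop :=
  max_notes ≤ 9000 ∨
    ((∀ iv ∈ allowed_intervals, ¬(iv ≤ 0 ∧ iv ≤ max_semitones)) ∧
     (∀ iv ∈ allowed_intervals, (1 ≤ iv ∧ iv ≤ max_semitones) → max_semitones ≤ 8999 * iv))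
instance (root : Int) (max_semitones : Int) (allowed_intervals : List Int) (max_notes : Int) (min_notes : Int) : Decidable (Pre_interval_stack_voicings root max_semitones allowed_intervals max_notes min_notes) := by unfold Pre_interval_stack_voicings; infer_instance
def pvWitness_interval_stack_voicings : Int × Int × List Int × Int × Int := (0, 12, [3, 4, 5], 4, 3)

def Spec_interval_stack_voicings (root : Int) (max_semitones : Int) (allowed_intervals : List Int) (max_notes : Int) (min_notes : Int) (out : List (List Int)) : Prop := out = interval_stack_voicings_alt root max_semitones allowed_intervals max_notes min_notes
instance (root : Int) (max_semitones : Int) (allowed_intervals : List Int) (max_notes : Int) (min_notes : Int) (out : List (List Int)) : Decidable (Spec_interval_stack_voicings root max_semitones allowed_intervals max_notes min_notes out) := by unfold Spec_interval_stack_voicings; infer_instance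

-- ===== CLAIM (what is proved, stated in full; the proofs are below) =====
def Claim_equal_interval_stack_voicings : Prop := ∀ (root : Int) (max_semitones : Int) (allowed_intervals : List Int) (max_notes : Int) (min_notes : Int), Dom_interval_stack_voicings root max_semitones allowed_intervals max_notes min_notes → Pre_interval_stack_voicings root max_semitones allowed_intervals max_notes min_notes → Spec_interval_stack_voicings root max_semitones allowed_intervals max_notes min_notes (interval_stack_voicings root max_semitones allowed_intervals max_notes min_notes)

-- ===== LEMMAS AND PROOFS =====

-- the common mathematical description of the DFS: pre-order list of in-range paths rooted at p
def pvF (root ms : Int) (allowed : List Int) (maxN minN : Int) (p : List Int) : List (List Int) :=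
  (if minN ≤ (p.length : Int) ∧ (p.length : Int) ≤ maxN then [p] else []) ++
  (if h : (p.length : Int) < maxN then
     allowed.flatMap (fun iv =>
       if pvLastD p + iv - root > ms then []
       else pvF root ms allowed maxN minN (p ++ [pvLastD p + iv]))
   else [])
termination_by (maxN - (p.length : Int)).toNat
decreasing_by simp; omega

theorem pvA_eq (root ms : Int) (allowed : List Int) (maxN minN : Int) :
    ∀ (n : Nat) (current : List Int) (results : List (List Int)),
      (maxN - (current.length : Int)).toNat ≤ n →
      pvRecurA root ms allowed maxN minN current results = results ++ pvF root ms allowed maxN minN current := by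
  intro n
  induction n using Nat.strong_induction_on with
  | _ n IH =>
  intro current results hn
  rw [pvRecurA, pvF]
  by_cases hge : (current.length : Int) ≥ maxN
  · rw [if_pos hge, dif_neg (by omega : ¬ (current.length : Int) < maxN)]
    split_ifs <;> simp
  · have hlt : (current.length : Int) < maxN := by omega
    rw [if_neg hge, dif_pos hlt]
    have hloop : ∀ (ivs : List Int) (r : List (List Int)),
        pvLoopA root ms allowed maxN minN current ivs r
          = r ++ ivs.flatMap (fun iv => if pvLastD current + iv - root > ms then []
              else pvF root ms allowed maxN minN (current ++ [pvLastD current + iv])) := by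
      intro ivs
      induction ivs with
      | nil => intro r; rw [pvLoopA]; simp
      | cons iv rest ihl =>
        intro r
        rw [pvLoopA]
        by_cases hc : pvLastD current + iv - root > ms
        · rw [if_pos hc, ihl]
          simp [hc]
        · rw [if_neg hc, dif_pos hlt, ihl,
              IH (n - 1) (by omega) (current ++ [pvLastD current + iv]) r (by simp; omega)]
          simp [hc]
    rw [hloop]
    split_ifs <;> simp

theorem pvPush_flatten (root ms : Int) (allowed : List Int) (maxN minN : Int) (path : List Int) :
    ∀ (l : List Int) (st : List (List Int)),
      (((l.foldl (fun st iv => if pvLastD path + iv - root ≤ ms then st ++ [path ++ [pvLastD path + iv]] else st) st)).reverse.map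
          (pvF root ms allowed maxN minN)).flatten
        = l.reverse.flatMap (fun iv => if pvLastD path + iv - root ≤ ms then pvF root ms allowed maxN minN (path ++ [pvLastD path + iv]) else [])
          ++ (st.reverse.map (pvF root ms allowed maxN minN)).flatten := by
  intro l
  induction l with
  | nil => intro st; simp
  | cons iv rest ih =>
    intro st
    rw [List.foldl_cons, ih]
    by_cases hc : pvLastD path + iv - root ≤ ms <;> simp [hc] <;>
      (intro hx; exact absurd hx (by omega))

theorem pvB_eq (root ms : Int) (allowed : List Int) (maxN minN : Int) :
    ∀ (n : Nat) (stack : List (List Int)) (results : List (List Int)),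
      pvPhi allowed maxN stack ≤ n →
      pvLoopB root ms allowed maxN minN stack results
        = results ++ (stack.reverse.map (pvF root ms allowed maxN minN)).flatten := by
  intro n
  induction n using Nat.strong_induction_on with
  | _ n IH =>
  intro stack results hn
  rw [pvLoopB]
  by_cases hs : stack = []
  · subst hs; simp
  · simp only [dif_neg hs]
    have hpos : 1 ≤ pvPhi allowed maxN stack := by
      have := pvPhi_dropLast_lt allowed maxN stack hs
      omega
    by_cases hlt : ((stack.getLast hs).length : Int) < maxN
    · rw [dif_pos hlt,
          IH (n - 1) (by omega) _ _ (by
            have h1 := pvPhi_push_lt root ms maxN allowed (stack.getLast hs) stack.dropLast hlt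
            rw [List.dropLast_append_getLast hs] at h1
            omega)]
      unfold pvPushB
      rw [pvPush_flatten, List.reverse_reverse]
      conv_rhs => rw [← List.dropLast_append_getLast hs]
      simp only [List.reverse_append, List.reverse_singleton, List.singleton_append,
        List.map_cons, List.flatten_cons]
      rw [pvF, dif_pos hlt]
      rw [show (fun iv => if pvLastD (stack.getLast hs) + iv - root ≤ ms then
              pvF root ms allowed maxN minN (stack.getLast hs ++ [pvLastD (stack.getLast hs) + iv])
            else ([] : List (List Int)))
          = (fun iv => if pvLastD (stack.getLast hs) + iv - root > ms then []
              else pvF root ms allowed maxN minN (stack.getLast hs ++ [pvLastD (stack.getLast hs) + iv]))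
          from funext fun iv => by split_ifs <;> first | rfl | (exfalso; omega)]
      split_ifs <;> simp
    · rw [dif_neg hlt,
          IH (n - 1) (by omega) _ _ (by
            have := pvPhi_dropLast_lt allowed maxN stack hs
            omega)]
      conv_rhs => rw [← List.dropLast_append_getLast hs]
      simp only [List.reverse_append, List.reverse_singleton, List.singleton_append,
        List.map_cons, List.flatten_cons]
      rw [pvF, dif_neg hlt]
      split_ifs <;> simp

-- ===== VERDICT (by name: the statement is the Claim_ definition above) =====
theorem interval_stack_voicings_spec : Claim_equal_interval_stack_voicings := by
  intro root ms allowed maxN minN _dom hpre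
  rcases hpre with _ | _ <;>
    (unfold Spec_interval_stack_voicings interval_stack_voicings interval_stack_voicings_alt
     rw [pvA_eq root ms allowed maxN minN (maxN - 1).toNat [root] [] (by simp),
         pvB_eq root ms allowed maxN minN (pvPhi allowed maxN [[root]]) [[root]] [] le_rfl]
     simp)
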